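-- pv_equiv track=rewrite | github.com/biosustain/pankb_db | etl/isolation_nova.py | check_perfect_match
-- ===== SOURCE A (Python) =====
-- def check_perfect_match(country_entry, countries_dict):
--     """
--     Check for perfect matches in the country dictionary.
--     This includes matching against both the keys and any aliases in the value lists.
--     """
--     for normalized_country, aliases in countries_dict.items():
--         if isinstance(aliases, list):
--             if country_entry.strip().lower() in map(str.lower, aliases):
--                 return normalized_country
--         else:
--             if country_entry.strip().lower() == aliases.lower():
--                 return normalized_country
--     return None
-- ===== SOURCE B (Python) =====
-- def check_perfect_match(country_entry, countries_dict):
--     """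
--     Check for perfect matches in the country dictionary.
--     Builds a reverse lookup table (lowercased alias -> normalized country,
--     first country wins) and answers with a single dict lookup.
--     """
--     lookup = {}
--     for normalized_country, aliases in countries_dict.items():
--         alias_list = aliases if isinstance(aliases, list) else [aliases]
--         for alias in alias_list:
--             lookup.setdefault(alias.lower(), normalized_country)
--     return lookup.get(country_entry.strip().lower())
-- ===== Notes on version B (the rewrite author's own statement) =====
-- stated objective: idiomatic
-- what changed: Replaced the early-returning scan over items that re-normalizes the query and lowercases every alias per iteration with an index-build-then-single-lookup shape: a reverse dict lowercased-alias -> country filled with setdefault (first country wins), answered by one .get().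
import Mathlib
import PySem

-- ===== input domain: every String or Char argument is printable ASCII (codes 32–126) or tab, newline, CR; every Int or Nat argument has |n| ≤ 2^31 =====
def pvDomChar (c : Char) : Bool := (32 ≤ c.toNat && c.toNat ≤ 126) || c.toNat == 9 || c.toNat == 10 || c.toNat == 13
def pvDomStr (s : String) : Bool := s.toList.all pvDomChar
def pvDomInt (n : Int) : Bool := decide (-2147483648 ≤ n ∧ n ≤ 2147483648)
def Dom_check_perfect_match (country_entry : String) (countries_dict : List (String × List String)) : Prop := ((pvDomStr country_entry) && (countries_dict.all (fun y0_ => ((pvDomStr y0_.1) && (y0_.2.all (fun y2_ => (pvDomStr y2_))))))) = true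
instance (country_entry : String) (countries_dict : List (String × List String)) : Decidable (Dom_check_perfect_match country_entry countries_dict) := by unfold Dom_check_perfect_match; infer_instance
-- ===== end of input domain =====

-- B replaces A's early-returning scan (which lowercases every alias per iteration) by building a
-- reverse lookup dict (lowered alias -> first country) once and answering with one dict lookup;
-- objective: idiomatic. Under the type convention dict values are List String, so A's isinstance
-- branch is always the list branch.

-- ===== PORT A =====
def check_perfect_match (country_entry : String) (countries_dict : List (String × List String)) : Option String :=
  match countries_dict with
  | [] => none
  | (normalized_country, aliases) :: rest =>
    if PySem.Str.lower (PySem.Str.strip country_entry) ∈ aliases.map PySem.Str.lower then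
      some normalized_country
    else
      check_perfect_match country_entry rest

-- ===== PORT B =====
-- the reverse lookup table Source B builds: lowered alias -> normalized country, first wins (setdefault)
def pvBuildLookup (countries_dict : List (String × List String)) : PySem.Dict String String :=
  countries_dict.foldl
    (fun lookup p => p.2.foldl (fun lk al => lk.setdefault (PySem.Str.lower al) p.1) lookup)
    PySem.Dict.empty

def check_perfect_match_alt (country_entry : String) (countries_dict : List (String × List String)) : Option String :=
  (pvBuildLookup countries_dict).get? (PySem.Str.lower (PySem.Str.strip country_entry))

-- ===== PRECONDITION & SPEC =====
def Spec_check_perfect_match (country_entry : String) (countries_dict : List (String × List String)) (out : Option String) : Prop := out = check_perfect_match_alt country_entry countries_dict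
instance (country_entry : String) (countries_dict : List (String × List String)) (out : Option String) : Decidable (Spec_check_perfect_match country_entry countries_dict out) := by unfold Spec_check_perfect_match; infer_instance

-- ===== CLAIM (what is proved, stated in full; the proofs are below) =====
def Claim_equal_check_perfect_match : Prop := ∀ (country_entry : String) (countries_dict : List (String × List String)), Dom_check_perfect_match country_entry countries_dict → Spec_check_perfect_match country_entry countries_dict (check_perfect_match country_entry countries_dict)

-- ===== LEMMAS AND PROOFS =====

theorem get?_setdefault (d : PySem.Dict String String) (k k' : String) (v : String) :
    (d.setdefault k v).get? k' = ((d.get? k').orElse (fun _ => if k' = k then some v else none)) := by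
  simp only [PySem.Dict.setdefault, PySem.Dict.get?, PySem.Dict.contains]
  split
  · rename_i hc
    cases hg : List.find? (fun p => p.1 == k') d.items with
    | some p => simp
    | none =>
      simp only [Option.map_none, Option.orElse]
      by_cases h : k' = k
      · exfalso
        subst h
        simp only [List.any_eq_true] at hc
        obtain ⟨p, hp, hk⟩ := hc
        have := List.find?_eq_none.mp hg p hp
        simp_all
      · simp [h]
  · rw [List.find?_append]
    cases hg : List.find? (fun p => p.1 == k') d.items with
    | some p => simp
    | none =>
      by_cases h : k' = k
      · subst h; simp
      · simp [h, Ne.symm h]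

-- the inner setdefault loop over one alias list, seen through get?
theorem get?_inner (aliases : List String) (acc : PySem.Dict String String) (nc key : String) :
    (aliases.foldl (fun lk al => lk.setdefault (PySem.Str.lower al) nc) acc).get? key
      = (acc.get? key).orElse
          (fun _ => if key ∈ aliases.map PySem.Str.lower then some nc else none) := by
  induction aliases generalizing acc with
  | nil => cases h : acc.get? key <;> simp [Option.orElse, h]
  | cons a rest ih =>
    simp only [List.foldl_cons, ih, get?_setdefault]
    cases h : acc.get? key with
    | some v => simp [Option.orElse]
    | none =>
      by_cases hk : key = PySem.Str.lower a
      · simp [Option.orElse, hk]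
      · simp [Option.orElse, hk, List.mem_cons]

-- the whole build loop, seen through get? at the query key, is A's scan
theorem get?_build (country_entry : String) (countries_dict : List (String × List String))
    (acc : PySem.Dict String String) :
    (countries_dict.foldl
        (fun lookup p => p.2.foldl (fun lk al => lk.setdefault (PySem.Str.lower al) p.1) lookup)
        acc).get? (PySem.Str.lower (PySem.Str.strip country_entry))
      = (acc.get? (PySem.Str.lower (PySem.Str.strip country_entry))).orElse
          (fun _ => check_perfect_match country_entry countries_dict) := by
  induction countries_dict generalizing acc with
  | nil => cases h : acc.get? (PySem.Str.lower (PySem.Str.strip country_entry)) <;>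
      simp [check_perfect_match, Option.orElse, h]
  | cons p rest ih =>
    obtain ⟨nc, aliases⟩ := p
    simp only [List.foldl_cons, ih, get?_inner, check_perfect_match]
    cases h : acc.get? (PySem.Str.lower (PySem.Str.strip country_entry)) with
    | some v => simp [Option.orElse]
    | none =>
      by_cases hm : PySem.Str.lower (PySem.Str.strip country_entry) ∈ aliases.map PySem.Str.lower
      · simp [Option.orElse, hm]
      · simp [Option.orElse, hm]

-- ===== VERDICT (by name: the statement is the Claim_ definition above) =====
theorem check_perfect_match_spec : Claim_equal_check_perfect_match := by
  intro country_entry countries_dict _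
  unfold Spec_check_perfect_match check_perfect_match_alt pvBuildLookup
  rw [get?_build]
  simp [PySem.Dict.empty, PySem.Dict.get?, Option.orElse]
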